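-- pv_equiv track=rewrite | github.com/wwbweibo/RoudDetect | Feature.py | find_min_max_width_vertical
-- ===== SOURCE A (Python) =====
-- def find_min_max_width_vertical(contour):
--     min_dict = dict()
--     max_dict = dict()
--     max_width = 0
--     min_width = 999
--     min_pos = 0
--     max_pos = 0
--     for pt in contour:
--         if min_dict.get(pt[0][1]) is None or max_dict.get(pt[0][1]) is None:
--             min_dict[pt[0][1]] = max_dict[pt[0][1]] = pt[0][0]
--         elif min_dict[pt[0][1]] > pt[0][0]:
--             min_dict[pt[0][1]] = pt[0][0]
--             if max_width < (max_dict[pt[0][1]] - min_dict[pt[0][1]]):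
--                 max_width = max_dict[pt[0][1]] - min_dict[pt[0][1]]
--                 max_pos = pt[0][0]
--             if min_width > (max_dict[pt[0][1]] - min_dict[pt[0][1]]):
--                 min_width = max_dict[pt[0][1]] - min_dict[pt[0][1]]
--                 min_pos = pt[0][0]
--         elif max_dict[pt[0][1]] < pt[0][0]:
--             max_dict[pt[0][1]] = pt[0][0]
--             if max_width < (max_dict[pt[0][1]] - min_dict[pt[0][1]]):
--                 max_width = max_dict[pt[0][1]] - min_dict[pt[0][1]]
--                 max_pos = pt[0][0]
--             if min_width > (max_dict[pt[0][1]] - min_dict[pt[0][1]]):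
--                 min_width = max_dict[pt[0][1]] - min_dict[pt[0][1]]
--                 min_pos = pt[0][0]
--     return max_width, min_width
-- ===== SOURCE B (Python) =====
-- def find_min_max_width_vertical(contour):
--     # per-row span tracking; max_width from final spans, min_width from each
--     # row's first widening (return-value equivalent; no positions tracked)
--     lo = dict()
--     hi = dict()
--     min_width = 999
--     for pt in contour:
--         x, y = pt[0][0], pt[0][1]
--         if y not in lo:
--             lo[y] = hi[y] = x
--         else:
--             if lo[y] == hi[y] and x != lo[y]:
--                 w = abs(x - lo[y])
--                 if w < min_width:
--                     min_width = w
--             if x < lo[y]: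
--                 lo[y] = x
--             elif x > hi[y]:
--                 hi[y] = x
--     max_width = 0
--     for y in lo:
--         if hi[y] - lo[y] > max_width:
--             max_width = hi[y] - lo[y]
--     return max_width, min_width
-- ===== Notes on version B (the rewrite author's own statement) =====
-- stated objective: simpler
-- what changed: B drops the position bookkeeping and the per-event double threshold checks: it only tracks per-row lo/hi extremes, records min_width solely at a row's first widening (detected by span == 0), and computes max_width from the final per-row spans after the loop instead of maintaining it at every extension event.
import Mathlib
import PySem

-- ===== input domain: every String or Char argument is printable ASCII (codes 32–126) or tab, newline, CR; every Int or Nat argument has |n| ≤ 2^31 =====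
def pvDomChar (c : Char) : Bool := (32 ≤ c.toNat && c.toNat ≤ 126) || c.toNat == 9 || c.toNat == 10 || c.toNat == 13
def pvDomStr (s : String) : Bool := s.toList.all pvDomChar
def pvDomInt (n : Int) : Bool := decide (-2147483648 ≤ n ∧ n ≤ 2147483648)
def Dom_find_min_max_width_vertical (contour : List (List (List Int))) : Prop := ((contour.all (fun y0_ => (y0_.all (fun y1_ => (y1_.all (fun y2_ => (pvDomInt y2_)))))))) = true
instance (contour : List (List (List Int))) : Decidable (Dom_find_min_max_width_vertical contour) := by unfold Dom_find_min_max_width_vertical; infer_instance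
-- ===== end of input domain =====

-- B computes min_width only at each row's first widening (detected by span = 0) and
-- max_width from the final per-row spans after the loop, instead of A's re-checking of
-- both running extrema at every extension event; return value only (no positions kept).

-- ===== PORT A =====
structure StA where
  minD : PySem.Dict Int Int
  maxD : PySem.Dict Int Int
  maxW : Int
  minW : Int
  minPos : Int
  maxPos : Int
deriving Repr, DecidableEq

def stepA (st : StA) (pt : List (List Int)) : StA :=
  let y := PySem.List.pyGetD (PySem.List.pyGetD pt 0 []) 1 0
  let x := PySem.List.pyGetD (PySem.List.pyGetD pt 0 []) 0 0
  if (st.minD.get? y).isNone || (st.maxD.get? y).isNone then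
    { st with minD := st.minD.insert y x, maxD := st.maxD.insert y x }
  else if st.minD.getD y 0 > x then
    let minD' := st.minD.insert y x
    let s := st.maxD.getD y 0 - minD'.getD y 0
    let mwp := if st.maxW < s then (s, x) else (st.maxW, st.maxPos)
    let mnp := if st.minW > s then (s, x) else (st.minW, st.minPos)
    ⟨minD', st.maxD, mwp.1, mnp.1, mnp.2, mwp.2⟩
  else if st.maxD.getD y 0 < x then
    let maxD' := st.maxD.insert y x
    let s := maxD'.getD y 0 - st.minD.getD y 0
    let mwp := if st.maxW < s then (s, x) else (st.maxW, st.maxPos)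
    let mnp := if st.minW > s then (s, x) else (st.minW, st.minPos)
    ⟨st.minD, maxD', mwp.1, mnp.1, mnp.2, mwp.2⟩
  else st

def find_min_max_width_vertical (contour : List (List (List Int))) : Int × Int :=
  let st := contour.foldl stepA ⟨PySem.Dict.empty, PySem.Dict.empty, 0, 999, 0, 0⟩
  (st.maxW, st.minW)

-- ===== PORT B =====
structure StB where
  lo : PySem.Dict Int Int
  hi : PySem.Dict Int Int
  minW : Int
deriving Repr, DecidableEq

def stepB (st : StB) (pt : List (List Int)) : StB :=
  let x := PySem.List.pyGetD (PySem.List.pyGetD pt 0 []) 0 0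
  let y := PySem.List.pyGetD (PySem.List.pyGetD pt 0 []) 1 0
  if st.lo.contains y = false then
    ⟨st.lo.insert y x, st.hi.insert y x, st.minW⟩
  else
    let l := st.lo.getD y 0
    let h := st.hi.getD y 0
    let mn := if l = h ∧ x ≠ l then (if |x - l| < st.minW then |x - l| else st.minW)
              else st.minW
    if x < l then ⟨st.lo.insert y x, st.hi, mn⟩
    else if h < x then ⟨st.lo, st.hi.insert y x, mn⟩
    else ⟨st.lo, st.hi, mn⟩

def find_min_max_width_vertical_alt (contour : List (List (List Int))) : Int × Int :=
  let st := contour.foldl stepB ⟨PySem.Dict.empty, PySem.Dict.empty, 999⟩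
  let mw := st.lo.keys.foldl
    (fun m y => if st.hi.getD y 0 - st.lo.getD y 0 > m then st.hi.getD y 0 - st.lo.getD y 0 else m) 0
  (mw, st.minW)

-- ===== PRECONDITION & SPEC =====
-- Pre_ excludes exactly the inputs where Python A raises IndexError: a contour containing
-- an empty point list, or one whose first point has fewer than two coordinates
-- (pt[0][0] / pt[0][1] are accessed for every point).
def Pre_find_min_max_width_vertical (contour : List (List (List Int))) : Prop :=
  ∀ pt ∈ contour, 1 ≤ pt.length ∧ 2 ≤ (pt.headD []).length
instance (contour : List (List (List Int))) : Decidable (Pre_find_min_max_width_vertical contour) := by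
  unfold Pre_find_min_max_width_vertical; infer_instance

def pvWitness_find_min_max_width_vertical : List (List (List Int)) := [[[0, 0]], [[3, 0]], [[1, 0]]]

def Spec_find_min_max_width_vertical (contour : List (List (List Int))) (out : Int × Int) : Prop := out = find_min_max_width_vertical_alt contour
instance (contour : List (List (List Int))) (out : Int × Int) : Decidable (Spec_find_min_max_width_vertical contour out) := by unfold Spec_find_min_max_width_vertical; infer_instance

-- ===== CLAIM (what is proved, stated in full; the proofs are below) =====
def Claim_equal_find_min_max_width_vertical : Prop := ∀ (contour : List (List (List Int))), Dom_find_min_max_width_vertical contour → Pre_find_min_max_width_vertical contour → Spec_find_min_max_width_vertical contour (find_min_max_width_vertical contour)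

-- ===== LEMMAS AND PROOFS =====

-- span of row y as stored in the two dictionaries
def spanF (lo hi : PySem.Dict Int Int) (y : Int) : Int := hi.getD y 0 - lo.getD y 0

-- B's final max-width fold, as a named helper for the invariant
def rmax (lo hi : PySem.Dict Int Int) : Int :=
  lo.keys.foldl
    (fun m y => if hi.getD y 0 - lo.getD y 0 > m then hi.getD y 0 - lo.getD y 0 else m) 0

theorem ite_gt_eq_max (m a : Int) : (if a > m then a else m) = max m a := by
  rcases le_or_gt a m with h | h
  · simp [not_lt.2 h, max_eq_left h]
  · simp [h, max_eq_right (le_of_lt h)]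

theorem foldl_max_init (s : Int → Int) :
    ∀ (l : List Int) (b t : Int),
      l.foldl (fun m y => max m (s y)) (max b t) = max (l.foldl (fun m y => max m (s y)) b) t := by
  intro l
  induction l with
  | nil => intro b t; simp
  | cons a l ih =>
    intro b t
    simp only [List.foldl_cons]
    rw [max_right_comm b t (s a)]
    exact ih (max b (s a)) t

theorem foldl_maxform_nonneg (s : Int → Int) (l : List Int) :
    0 ≤ l.foldl (fun m y => max m (s y)) 0 := by
  rw [← List.foldl_map]
  exact (PySem.List.le_foldl_max (l.map s) 0).1

theorem foldl_max_update (s s' : Int → Int) (y t : Int) :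
    ∀ (l : List Int), l.Nodup → y ∈ l → (∀ k ∈ l, k ≠ y → s' k = s k) → s' y = t → s y ≤ t →
      ∀ b, l.foldl (fun m k => max m (s' k)) b = max (l.foldl (fun m k => max m (s k)) b) t := by
  intro l
  induction l with
  | nil => intro _ hy; exact absurd hy (List.not_mem_nil)
  | cons a l ih =>
    intro hnd hy hcong h't hle b
    simp only [List.foldl_cons]
    by_cases ha : a = y
    · subst ha
      have hyl : a ∉ l := (List.nodup_cons.mp hnd).1
      have hs : ∀ acc, ∀ k ∈ l, max acc (s' k) = max acc (s k) := by
        intro acc k hk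
        rw [hcong k (List.mem_cons_of_mem _ hk) (fun h => hyl (h ▸ hk))]
      rw [PySem.List.foldl_congr_mem l _ (fun m k => max m (s k)) _ hs, h't,
          foldl_max_init, foldl_max_init, max_assoc, max_eq_right hle]
    · have h'a : s' a = s a := hcong a (List.mem_cons_self) ha
      have hy' : y ∈ l := by
        rcases List.mem_cons.mp hy with h | h
        · exact absurd h.symm ha
        · exact h
      rw [h'a]
      exact ih (List.nodup_cons.mp hnd).2 hy'
        (fun k hk hne => hcong k (List.mem_cons_of_mem _ hk) hne) h't hle (max b (s a))

theorem rmax_eq_max_form (lo hi : PySem.Dict Int Int) :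
    rmax lo hi = lo.keys.foldl (fun m y => max m (spanF lo hi y)) 0 := by
  unfold rmax spanF
  exact PySem.List.foldl_congr_mem _ _ _ _ (fun acc k _ => ite_gt_eq_max acc _)

theorem rmax_nonneg (lo hi : PySem.Dict Int Int) : 0 ≤ rmax lo hi := by
  rw [rmax_eq_max_form]; exact foldl_maxform_nonneg _ _

theorem rmax_insert_fresh (lo hi : PySem.Dict Int Int) (y x : Int)
    (hc : lo.contains y = false) (_hch : hi.contains y = false) :
    rmax (lo.insert y x) (hi.insert y x) = rmax lo hi := by
  rw [rmax_eq_max_form, rmax_eq_max_form,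
      PySem.Dict.keys_insert_of_not_contains lo x hc, List.foldl_append]
  have hymem : y ∉ lo.keys := by
    intro h
    rw [(PySem.Dict.contains_iff_mem_keys lo y).mpr h] at hc
    exact Bool.false_ne_true hc.symm
  have hcong : ∀ acc, ∀ k ∈ lo.keys,
      max acc (spanF (lo.insert y x) (hi.insert y x) k) = max acc (spanF lo hi k) := by
    intro acc k hk
    have hne : k ≠ y := fun h => hymem (h ▸ hk)
    unfold spanF
    rw [PySem.Dict.getD_insert_of_ne _ _ _ hne, PySem.Dict.getD_insert_of_ne _ _ _ hne]
  rw [PySem.List.foldl_congr_mem _ _ _ _ hcong]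
  simp only [List.foldl_cons, List.foldl_nil]
  have h0 : spanF (lo.insert y x) (hi.insert y x) y = 0 := by
    unfold spanF
    rw [PySem.Dict.getD_insert_self, PySem.Dict.getD_insert_self]
    ring
  rw [h0, max_eq_left (by rw [← rmax_eq_max_form]; exact rmax_nonneg lo hi)]

theorem rmax_update_lo (lo hi : PySem.Dict Int Int) (y x : Int)
    (hc : lo.contains y = true) (hnd : lo.keys.Nodup)
    (hle : spanF lo hi y ≤ hi.getD y 0 - x) :
    rmax (lo.insert y x) hi = max (rmax lo hi) (hi.getD y 0 - x) := by
  rw [rmax_eq_max_form, rmax_eq_max_form, PySem.Dict.keys_insert_of_contains lo x hc]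
  exact foldl_max_update (spanF lo hi) (spanF (lo.insert y x) hi) y _ lo.keys hnd
    ((PySem.Dict.contains_iff_mem_keys lo y).mp hc)
    (fun k _ hne => by unfold spanF; rw [PySem.Dict.getD_insert_of_ne _ _ _ hne])
    (by unfold spanF; rw [PySem.Dict.getD_insert_self]) hle 0

theorem rmax_update_hi (lo hi : PySem.Dict Int Int) (y x : Int)
    (hc : lo.contains y = true) (hnd : lo.keys.Nodup)
    (hle : spanF lo hi y ≤ x - lo.getD y 0) :
    rmax lo (hi.insert y x) = max (rmax lo hi) (x - lo.getD y 0) := by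
  rw [rmax_eq_max_form, rmax_eq_max_form]
  exact foldl_max_update (spanF lo hi) (spanF lo (hi.insert y x)) y _ lo.keys hnd
    ((PySem.Dict.contains_iff_mem_keys lo y).mp hc)
    (fun k _ hne => by unfold spanF; rw [PySem.Dict.getD_insert_of_ne _ _ _ hne])
    (by unfold spanF; rw [PySem.Dict.getD_insert_self]) hle 0

-- the coupling invariant between A's and B's loop states
def InvAB (a : StA) (b : StB) : Prop :=
  a.minD = b.lo ∧ a.maxD = b.hi ∧ a.minW = b.minW ∧
  a.minD.keys.Nodup ∧
  (∀ y, a.minD.contains y = a.maxD.contains y) ∧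
  (∀ y, a.minD.contains y = true →
     a.minD.getD y 0 ≤ a.maxD.getD y 0 ∧
     (a.minD.getD y 0 < a.maxD.getD y 0 → a.minW ≤ a.maxD.getD y 0 - a.minD.getD y 0)) ∧
  a.maxW = rmax a.minD a.maxD

theorem InvAB_step (a : StA) (b : StB) (pt : List (List Int)) (h : InvAB a b) :
    InvAB (stepA a pt) (stepB b pt) := by
  obtain ⟨lo, hi, mw, mn, mnp, mxp⟩ := a
  obtain ⟨blo, bhi, bmn⟩ := b
  obtain ⟨h1, h2, h3, hnd, hkeys, hspan, hmw⟩ := h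
  simp only at h1 h2 h3 hnd hkeys hspan hmw
  subst h1; subst h2; subst h3
  set y := PySem.List.pyGetD (PySem.List.pyGetD pt 0 []) 1 0 with hy
  set x := PySem.List.pyGetD (PySem.List.pyGetD pt 0 []) 0 0 with hx
  by_cases hc : lo.contains y = true
  · -- key already present: A takes the elif chain, B the else branch
    have hch : hi.contains y = true := (hkeys y) ▸ hc
    have hgs : (lo.get? y).isNone = false := by
      rw [PySem.Dict.contains_eq_isSome_get?] at hc
      cases hg : lo.get? y with
      | none => rw [hg] at hc; simp at hc
      | some v => simp
    have hgs2 : (hi.get? y).isNone = false := by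
      rw [PySem.Dict.contains_eq_isSome_get?] at hch
      cases hg : hi.get? y with
      | none => rw [hg] at hch; simp at hch
      | some v => simp
    obtain ⟨hlh, himp⟩ := hspan y hc
    set l := lo.getD y 0 with hl
    set h := hi.getD y 0 with hh
    by_cases hxl : x < l
    · -- widen to the left
      have eA : stepA ⟨lo, hi, mw, mn, mnp, mxp⟩ pt =
          ⟨lo.insert y x, hi, if mw < h - x then h - x else mw,
           if h - x < mn then h - x else mn,
           if h - x < mn then x else mnp, if mw < h - x then x else mxp⟩ := by
        simp only [stepA, ← hy, ← hx, hgs, hgs2, Bool.or_self, Bool.false_eq_true, if_false,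
          ← hl, ← hh, if_pos (show l > x from hxl), PySem.Dict.getD_insert_self]
        split_ifs <;> rfl
      have eB : stepB ⟨lo, hi, mn⟩ pt =
          ⟨lo.insert y x, hi,
           if l = h ∧ x ≠ l then (if |x - l| < mn then |x - l| else mn) else mn⟩ := by
        simp only [stepB, ← hy, ← hx, hc, Bool.true_eq_false, if_false, ← hl, ← hh,
          if_pos hxl]
      have hmneq : (if l = h ∧ x ≠ l then (if |x - l| < mn then |x - l| else mn) else mn)
          = if h - x < mn then h - x else mn := by
        by_cases hlh' : l = h
        · have hxnl : x ≠ l := by omega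
          have habs : |x - l| = h - x := by rw [abs_of_neg (by omega : x - l < 0)]; omega
          rw [if_pos ⟨hlh', hxnl⟩, habs]
        · have hlt : l < h := lt_of_le_of_ne hlh hlh'
          have hmle : mn ≤ h - l := himp hlt
          rw [if_neg (fun hcon : l = h ∧ x ≠ l => hlh' hcon.1),
            if_neg (by omega : ¬ (h - x < mn))]
      rw [eA, eB, hmneq]
      refine ⟨rfl, rfl, rfl, ?_, ?_, ?_, ?_⟩
      · exact PySem.Dict.nodup_keys_insert lo y x hnd
      · intro y'
        show (lo.insert y x).contains y' = hi.contains y'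
        rw [PySem.Dict.contains_insert]
        by_cases hyy : y' = y
        · subst hyy; simp [hch]
        · simp [beq_iff_eq, hyy, hkeys y']
      · intro y' hcy'
        show (lo.insert y x).getD y' 0 ≤ hi.getD y' 0 ∧ _
        have hmnle : (if h - x < mn then h - x else mn) ≤ mn := by
          by_cases hcmp : h - x < mn <;> simp [hcmp] <;> omega
        by_cases hyy : y' = y
        · subst hyy
          rw [PySem.Dict.getD_insert_self, ← hh]
          refine ⟨by omega, fun _ => ?_⟩
          by_cases hlh' : l = h
          · by_cases hcmp : h - x < mn <;> simp [hcmp] <;> omega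
          · have hlt : l < h := lt_of_le_of_ne hlh hlh'
            have := himp hlt
            by_cases hcmp : h - x < mn <;> simp [hcmp] <;> omega
        · rw [PySem.Dict.getD_insert_of_ne _ _ _ hyy]
          have hcy'' : lo.contains y' = true := by
            have := hcy'
            show lo.contains y' = true
            rw [show ((⟨lo.insert y x, hi, _, _, _, _⟩ : StA).minD = lo.insert y x) from rfl] at this
            rw [PySem.Dict.contains_insert] at this
            rcases Bool.or_eq_true_iff.mp this with hb | hb
            · exact absurd (beq_iff_eq.mp hb) hyy
            · exact hb
          obtain ⟨ha, hb⟩ := hspan y' hcy''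
          exact ⟨ha, fun hlt => le_trans hmnle (hb hlt)⟩
      · show (if mw < h - x then h - x else mw) = rmax (lo.insert y x) hi
        rw [rmax_update_lo lo hi y x hc hnd (by unfold spanF; rw [← hl, ← hh]; omega), ← hmw,
          ← hh]
        by_cases hcmp : mw < h - x
        · rw [if_pos hcmp, max_eq_right (le_of_lt hcmp)]
        · rw [if_neg hcmp, max_eq_left (by omega : h - x ≤ mw)]
    · by_cases hxh : h < x
      · -- widen to the right
        have eA : stepA ⟨lo, hi, mw, mn, mnp, mxp⟩ pt =
            ⟨lo, hi.insert y x, if mw < x - l then x - l else mw,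
             if x - l < mn then x - l else mn,
             if x - l < mn then x else mnp, if mw < x - l then x else mxp⟩ := by
          simp only [stepA, ← hy, ← hx, hgs, hgs2, Bool.or_self, Bool.false_eq_true, if_false,
            ← hl, ← hh, if_neg (show ¬ l > x from hxl), if_pos hxh,
            PySem.Dict.getD_insert_self]
          split_ifs <;> rfl
        have eB : stepB ⟨lo, hi, mn⟩ pt =
            ⟨lo, hi.insert y x,
             if l = h ∧ x ≠ l then (if |x - l| < mn then |x - l| else mn) else mn⟩ := by
          simp only [stepB, ← hy, ← hx, hc, Bool.true_eq_false, if_false, ← hl, ← hh,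
            if_neg hxl, if_pos hxh]
        have hlx : l < x := by omega
        have hmneq : (if l = h ∧ x ≠ l then (if |x - l| < mn then |x - l| else mn) else mn)
            = if x - l < mn then x - l else mn := by
          by_cases hlh' : l = h
          · have hxnl : x ≠ l := by omega
            have habs : |x - l| = x - l := abs_of_pos (by omega)
            rw [if_pos ⟨hlh', hxnl⟩, habs]
          · have hlt : l < h := lt_of_le_of_ne hlh hlh'
            have hmle : mn ≤ h - l := himp hlt
            rw [if_neg (fun hcon : l = h ∧ x ≠ l => hlh' hcon.1),
              if_neg (by omega : ¬ (x - l < mn))]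
        rw [eA, eB, hmneq]
        refine ⟨rfl, rfl, rfl, hnd, ?_, ?_, ?_⟩
        · intro y'
          show lo.contains y' = (hi.insert y x).contains y'
          rw [PySem.Dict.contains_insert]
          by_cases hyy : y' = y
          · subst hyy; simp [hc]
          · simp [beq_iff_eq, hyy, hkeys y']
        · intro y' hcy'
          show lo.getD y' 0 ≤ (hi.insert y x).getD y' 0 ∧ _
          have hcy'' : lo.contains y' = true := hcy'
          have hmnle : (if x - l < mn then x - l else mn) ≤ mn := by
            by_cases hcmp : x - l < mn <;> simp [hcmp] <;> omega
          by_cases hyy : y' = y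
          · subst hyy
            rw [PySem.Dict.getD_insert_self, ← hl]
            refine ⟨by omega, fun _ => ?_⟩
            by_cases hlh' : l = h
            · by_cases hcmp : x - l < mn <;> simp [hcmp] <;> omega
            · have hlt : l < h := lt_of_le_of_ne hlh hlh'
              have := himp hlt
              by_cases hcmp : x - l < mn <;> simp [hcmp] <;> omega
          · rw [PySem.Dict.getD_insert_of_ne _ _ _ hyy]
            obtain ⟨ha, hb⟩ := hspan y' hcy''
            exact ⟨ha, fun hlt => le_trans hmnle (hb hlt)⟩
        · show (if mw < x - l then x - l else mw) = rmax lo (hi.insert y x)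
          rw [rmax_update_hi lo hi y x hc hnd (by unfold spanF; rw [← hl, ← hh]; omega), ← hmw,
            ← hl]
          by_cases hcmp : mw < x - l
          · rw [if_pos hcmp, max_eq_right (le_of_lt hcmp)]
          · rw [if_neg hcmp, max_eq_left (by omega : x - l ≤ mw)]
      · -- inside the current span: both states unchanged
        have eA : stepA ⟨lo, hi, mw, mn, mnp, mxp⟩ pt = ⟨lo, hi, mw, mn, mnp, mxp⟩ := by
          simp only [stepA, ← hy, ← hx, hgs, hgs2, Bool.or_self, Bool.false_eq_true, if_false,
            ← hl, ← hh, if_neg (show ¬ l > x from hxl), if_neg hxh]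
        have eB : stepB ⟨lo, hi, mn⟩ pt = ⟨lo, hi, mn⟩ := by
          have hmnfix : (if l = h ∧ x ≠ l then (if |x - l| < mn then |x - l| else mn) else mn)
              = mn := by
            rcases eq_or_ne l h with hlh' | hlh'
            · have : x = l := by omega
              simp [this]
            · rw [if_neg (fun hcon : l = h ∧ x ≠ l => hlh' hcon.1)]
          simp only [stepB, ← hy, ← hx, hc, Bool.true_eq_false, if_false, ← hl, ← hh,
            if_neg hxl, if_neg hxh, hmnfix]
        rw [eA, eB]
        exact ⟨rfl, rfl, rfl, hnd, hkeys, hspan, hmw⟩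
  · -- fresh key: both insert
    have hc' : lo.contains y = false := by simpa using hc
    have hch : hi.contains y = false := (hkeys y) ▸ hc'
    have hgs : (lo.get? y).isNone = true := by
      rw [PySem.Dict.contains_eq_isSome_get?] at hc'
      cases hg : lo.get? y with
      | none => simp
      | some v => rw [hg] at hc'; simp at hc'
    have eA : stepA ⟨lo, hi, mw, mn, mnp, mxp⟩ pt =
        ⟨lo.insert y x, hi.insert y x, mw, mn, mnp, mxp⟩ := by
      simp only [stepA, ← hy, ← hx, hgs, Bool.true_or, if_true]
    have eB : stepB ⟨lo, hi, mn⟩ pt = ⟨lo.insert y x, hi.insert y x, mn⟩ := by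
      simp only [stepB, ← hy, ← hx, hc', if_true]
    rw [eA, eB]
    refine ⟨rfl, rfl, rfl, PySem.Dict.nodup_keys_insert lo y x hnd, ?_, ?_, ?_⟩
    · intro y'
      show (lo.insert y x).contains y' = (hi.insert y x).contains y'
      rw [PySem.Dict.contains_insert, PySem.Dict.contains_insert, hkeys y']
    · intro y' hcy'
      show (lo.insert y x).getD y' 0 ≤ (hi.insert y x).getD y' 0 ∧ _
      by_cases hyy : y' = y
      · subst hyy
        rw [PySem.Dict.getD_insert_self, PySem.Dict.getD_insert_self]
        exact ⟨le_refl _, fun hlt => absurd hlt (lt_irrefl _)⟩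
      · rw [PySem.Dict.getD_insert_of_ne _ _ _ hyy, PySem.Dict.getD_insert_of_ne _ _ _ hyy]
        have hcy'' : lo.contains y' = true := by
          have := hcy'
          rw [show ((⟨lo.insert y x, hi.insert y x, mw, mn, mnp, mxp⟩ : StA).minD
            = lo.insert y x) from rfl, PySem.Dict.contains_insert] at this
          rcases Bool.or_eq_true_iff.mp this with hb | hb
          · exact absurd (beq_iff_eq.mp hb) hyy
          · exact hb
        exact hspan y' hcy''
    · show mw = rmax (lo.insert y x) (hi.insert y x)
      rw [rmax_insert_fresh lo hi y x hc' hch]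
      exact hmw

theorem InvAB_foldl (l : List (List (List Int))) :
    ∀ (a : StA) (b : StB), InvAB a b → InvAB (l.foldl stepA a) (l.foldl stepB b) := by
  induction l with
  | nil => intro a b h; exact h
  | cons pt l ih => intro a b h; exact ih _ _ (InvAB_step a b pt h)

theorem InvAB_init : InvAB ⟨PySem.Dict.empty, PySem.Dict.empty, 0, 999, 0, 0⟩
    ⟨PySem.Dict.empty, PySem.Dict.empty, 999⟩ := by
  refine ⟨rfl, rfl, rfl, by simp [PySem.Dict.keys_empty], fun y => rfl, ?_, rfl⟩
  intro y hcy
  rw [PySem.Dict.contains_empty] at hcy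
  exact absurd hcy (by simp)

-- ===== VERDICT (by name: the statement is the Claim_ definition above) =====
theorem find_min_max_width_vertical_spec : Claim_equal_find_min_max_width_vertical := by
  intro contour _hdom _hpre
  unfold Spec_find_min_max_width_vertical
  have h := InvAB_foldl contour _ _ InvAB_init
  obtain ⟨h1, h2, h3, _, _, _, hmw⟩ := h
  dsimp only [find_min_max_width_vertical, find_min_max_width_vertical_alt]
  rw [hmw, h3, h1, h2]
  rfl
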